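-- pv_equiv track=rewrite | github.com/samiksha014/Python_Lab | count_valid_string.py | check_validity
-- ===== SOURCE A (Python) =====
-- def check_validity(text: str) -> str:
--     bracket_pairs = {')': '(', ']': '[', '}': '{', '>': '<'}
--     opening_brackets = set(bracket_pairs.values())
--     stack = []
--
--     for index, char in enumerate(text):
--         if char in opening_brackets:
--             stack.append(char)
--         elif char in bracket_pairs:
--             if not stack or stack[-1] != bracket_pairs[char]:
--                 return "invalid"
--             stack.pop()
--         elif not char.isalnum() and char not in " +-*/":
--             return "invalid"
--
--     if stack:
--         return "invalid"
--
--     return "valid"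
-- ===== SOURCE B (Python) =====
-- def check_validity(text: str) -> str:
--     # pass 1: every character must be alphanumeric, a bracket, or in " +-*/"
--     allowed = set("()[]{}<> +-*/")
--     for ch in text:
--         if not (ch.isalnum() or ch in allowed):
--             return "invalid"
--     # pass 2: keep only the brackets and reduce by string rewriting:
--     # repeatedly delete the first adjacent matching pair; the bracket
--     # sequence is well matched iff the reduction ends with nothing left.
--     s = [ch for ch in text if ch in "()[]{}<>"]
--     pairs = ("()", "[]", "{}", "<>")
--     while True:
--         for i in range(len(s) - 1):
--             if s[i] + s[i + 1] in pairs: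
--                 del s[i : i + 2]
--                 break
--         else:
--             break
--     return "valid" if not s else "invalid"
-- ===== Notes on version B (the rewrite author's own statement) =====
-- stated objective: alternative
-- what changed: B replaces A's fused single-pass stack matcher by a whitelist pass followed by a stackless string-rewriting reduction: it filters out the bracket characters and repeatedly deletes the first adjacent matching pair, declaring the string valid iff the reduction terminates empty.
import Mathlib
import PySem

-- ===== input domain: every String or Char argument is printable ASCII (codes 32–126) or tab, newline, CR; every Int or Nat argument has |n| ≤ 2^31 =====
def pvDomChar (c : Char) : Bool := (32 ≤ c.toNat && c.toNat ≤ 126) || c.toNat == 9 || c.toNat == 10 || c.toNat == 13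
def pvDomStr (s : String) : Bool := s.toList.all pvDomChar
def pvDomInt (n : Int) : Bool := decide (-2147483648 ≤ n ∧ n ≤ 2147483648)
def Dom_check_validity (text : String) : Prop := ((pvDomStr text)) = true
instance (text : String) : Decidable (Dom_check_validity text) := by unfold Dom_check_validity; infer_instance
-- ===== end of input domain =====

-- B replaces A's fused stack matcher by a whitelist pass plus a stackless string-rewriting
-- reduction (repeatedly delete the first adjacent matching bracket pair); same return value,
-- alternative algorithm (B is not faster).

-- ===== PORT A =====
-- bracket_pairs = {')': '(', ']': '[', '}': '{', '>': '<'}  (constant dict, ported as a lookup)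
def cvBracketPairs (c : Char) : Option Char :=
  if c = ')' then some '(' else if c = ']' then some '[' else
  if c = '}' then some '{' else if c = '>' then some '<' else none

-- the for-loop of A; the Python stack's top (stack[-1]) is the head of this list
def cvLoopA : List Char → List Char → String
  | [], stack => if stack ≠ [] then "invalid" else "valid"
  | c :: cs, stack =>
    if c = '(' ∨ c = '[' ∨ c = '{' ∨ c = '<' then cvLoopA cs (c :: stack)
    else match cvBracketPairs c with
      | some o =>
        match stack with
        | [] => "invalid"
        | t :: rest => if t ≠ o then "invalid" else cvLoopA cs rest
      | none =>
        if ¬ PySem.Chars.isalnum c ∧ c ∉ [' ', '+', '-', '*', '/'] then "invalid"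
        else cvLoopA cs stack

def check_validity (text : String) : String := cvLoopA text.toList []

-- ===== PORT B =====
-- pass 1 predicate of Source B: ch.isalnum() or ch in set("()[]{}<> +-*/")
def cvAllowedChar (c : Char) : Bool :=
  PySem.Chars.isalnum c ||
    ['(', ')', '[', ']', '{', '}', '<', '>', ' ', '+', '-', '*', '/'].contains c

-- ch in "()[]{}<>"
def cvIsBracket (c : Char) : Bool :=
  ['(', ')', '[', ']', '{', '}', '<', '>'].contains c

-- s[i] + s[i+1] in ("()", "[]", "{}", "<>")
def cvPairB (a b : Char) : Bool :=
  (a = '(' && b = ')') || (a = '[' && b = ']') || (a = '{' && b = '}') || (a = '<' && b = '>')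

-- the inner for-loop of Source B: find and delete the FIRST adjacent matching pair (none = for-else)
def cvStep : List Char → Option (List Char)
  | a :: b :: rest => if cvPairB a b then some rest else (cvStep (b :: rest)).map (a :: ·)
  | _ => none

-- the while-True loop of Source B; fuel = initial length bounds the number of iterations
-- (each successful step shortens the list by 2, so s.length fuel is never exhausted)
def cvReduce : Nat → List Char → List Char
  | 0, s => s
  | n + 1, s => match cvStep s with
    | none => s
    | some s' => cvReduce n s'

def check_validity_alt (text : String) : String :=
  if text.toList.all cvAllowedChar then
    let s := text.toList.filter cvIsBracket
    if cvReduce s.length s = [] then "valid" else "invalid"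
  else "invalid"

-- ===== PRECONDITION & SPEC =====
def Spec_check_validity (text : String) (out : String) : Prop := out = check_validity_alt text
instance (text : String) (out : String) : Decidable (Spec_check_validity text out) := by unfold Spec_check_validity; infer_instance

-- ===== CLAIM =====
def Claim_equal_check_validity : Prop := ∀ (text : String), Dom_check_validity text → Spec_check_validity text (check_validity text)

-- ===== LEMMAS AND PROOFS =====

def cvIsOpen (c : Char) : Bool := ['(', '[', '{', '<'].contains c

-- proof-side abstraction of A's loop on a bracket-only list: final stack, none = early "invalid"
def cvRun : List Char → List Char → Option (List Char)
  | [], st => some st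
  | c :: cs, st =>
    if cvIsOpen c then cvRun cs (c :: st)
    else match st with
      | [] => none
      | t :: r => if cvPairB t c then cvRun cs r else none

lemma cvRun_cons (c : Char) (cs st : List Char) :
    cvRun (c :: cs) st =
      (if cvIsOpen c then cvRun cs (c :: st)
       else match st with
         | [] => none
         | t :: r => if cvPairB t c then cvRun cs r else none) := rfl

lemma cvPairB_elim {a b : Char} (h : cvPairB a b = true) :
    cvIsOpen a = true ∧ cvIsOpen b = false := by
  simp only [cvPairB, Bool.or_eq_true, Bool.and_eq_true, decide_eq_true_eq] at h
  rcases h with ((⟨ha, hb⟩ | ⟨ha, hb⟩) | ⟨ha, hb⟩) | ⟨ha, hb⟩ <;> subst ha <;> subst hb <;>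
    simp [cvIsOpen]

lemma cvStep_len : ∀ {s s' : List Char}, cvStep s = some s' → s'.length + 2 = s.length := by
  intro s
  induction s with
  | nil => intro s' h; simp [cvStep] at h
  | cons a t ih =>
    cases t with
    | nil => intro s' h; simp [cvStep] at h
    | cons b rest =>
      intro s' h
      simp only [cvStep] at h
      split at h
      · cases h; simp
      · rcases Option.map_eq_some_iff.mp h with ⟨m, hm, rfl⟩
        have := ih hm
        simp only [List.length_cons] at this ⊢
        omega

lemma cvPairB_open (a b : Char) (hb : cvIsOpen b = true) : cvPairB a b = false := by
  simp only [cvIsOpen, List.contains_eq_mem, decide_eq_true_eq, List.mem_cons,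
    List.not_mem_nil, or_false] at hb
  rcases hb with h | h | h | h <;> subst h <;> simp [cvPairB]

lemma cvRun_step : ∀ (s s' st : List Char), cvStep s = some s' → cvRun s st = cvRun s' st := by
  intro s
  induction s with
  | nil => intro s' st h; simp [cvStep] at h
  | cons a t ih =>
    cases t with
    | nil => intro s' st h; simp [cvStep] at h
    | cons b rest =>
      intro s' st h
      simp only [cvStep] at h
      split at h
      case isTrue hp =>
        cases h
        obtain ⟨ha, hb⟩ := cvPairB_elim hp
        simp [cvRun_cons, ha, hb, hp]
      case isFalse hp =>
        rcases Option.map_eq_some_iff.mp h with ⟨m, hm, rfl⟩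
        by_cases ha : cvIsOpen a = true
        · calc cvRun (a :: b :: rest) st = cvRun (b :: rest) (a :: st) := by
                simp [cvRun_cons, ha]
            _ = cvRun m (a :: st) := ih m (a :: st) hm
            _ = cvRun (a :: m) st := by simp [cvRun_cons, ha]
        · simp only [Bool.not_eq_true] at ha
          cases st with
          | nil => simp [cvRun_cons, ha]
          | cons t r =>
            by_cases hq : cvPairB t a = true
            · calc cvRun (a :: b :: rest) (t :: r) = cvRun (b :: rest) r := by
                    simp [cvRun_cons, ha, hq]
                _ = cvRun m r := ih m r hm
                _ = cvRun (a :: m) (t :: r) := by simp [cvRun_cons, ha, hq]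
            · simp [cvRun_cons, ha, hq]

-- cvStep on a two-or-more list, unfolded
lemma cvStep_cons₂ (a b : Char) (rest : List Char) :
    cvStep (a :: b :: rest) =
      (if cvPairB a b then some rest else (cvStep (b :: rest)).map (a :: ·)) := rfl

-- if A's matcher accepts from some stack and the list starts with an opener, a pair exists
lemma cvProgress (s : List Char) : ∀ (st : List Char) (c : Char) (cs : List Char),
    s = c :: cs → cvRun s st = some [] → cvIsOpen c = true → cvStep s ≠ none := by
  induction s with
  | nil => intro st c cs he; exact absurd he (by simp)
  | cons a t ih =>
    intro st c cs he hrun hop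
    injection he with h1 h2
    subst h1; subst h2
    cases t with
    | nil =>
      rw [cvRun_cons] at hrun
      simp [hop, cvRun] at hrun
    | cons b rest =>
      have hrun' : cvRun (b :: rest) (a :: st) = some [] := by
        rw [cvRun_cons] at hrun; simpa [hop] using hrun
      by_cases hb : cvIsOpen b = true
      · have hne := ih (a :: st) b rest rfl hrun' hb
        have hpf : cvPairB a b = false := cvPairB_open a b hb
        intro hc
        rw [cvStep_cons₂, hpf] at hc
        simp only [Bool.false_eq_true, if_false, Option.map_eq_none_iff] at hc
        exact hne hc
      · simp only [Bool.not_eq_true] at hb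
        by_cases hq : cvPairB a b = true
        · intro hc
          rw [cvStep_cons₂, hq] at hc
          simp at hc
        · exfalso
          rw [cvRun_cons] at hrun'
          simp [hb, hq] at hrun'

lemma cvMain : ∀ (n : Nat) (s : List Char), s.length ≤ n →
    (cvRun s [] = some [] ↔ cvReduce n s = []) := by
  intro n
  induction n with
  | zero =>
    intro s hs
    have : s = [] := List.eq_nil_of_length_eq_zero (Nat.le_zero.mp hs)
    subst this
    simp [cvRun, cvReduce]
  | succ n ih =>
    intro s hs
    cases h : cvStep s with
    | none =>
      have hred : cvReduce (n + 1) s = s := by simp [cvReduce, h]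
      rw [hred]
      constructor
      · intro hrun
        cases s with
        | nil => rfl
        | cons c cs =>
          by_cases hop : cvIsOpen c = true
          · exact absurd h (cvProgress (c :: cs) [] c cs rfl hrun hop)
          · simp only [Bool.not_eq_true] at hop
            simp [cvRun, hop] at hrun
      · intro hnil; subst hnil; simp [cvRun]
    | some s' =>
      have hred : cvReduce (n + 1) s = cvReduce n s' := by simp [cvReduce, h]
      rw [hred, cvRun_step s s' [] h]
      exact ih s' (by have := cvStep_len h; omega)

-- bridge: A's fused loop = whitelist check + cvRun on the filtered brackets
lemma cvBridgeA : ∀ (cs st : List Char),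
    cvLoopA cs st =
      (if cs.all cvAllowedChar ∧ cvRun (cs.filter cvIsBracket) st = some [] then "valid"
       else "invalid") := by
  intro cs
  induction cs with
  | nil =>
    intro st
    cases st <;> simp [cvLoopA, cvRun]
  | cons c cs ih =>
    intro st
    by_cases hop : c = '(' ∨ c = '[' ∨ c = '{' ∨ c = '<'
    · have h1 : cvLoopA (c :: cs) st = cvLoopA cs (c :: st) := by simp [cvLoopA, hop]
      rw [h1, ih (c :: st)]
      rcases hop with h | h | h | h <;> subst h <;>
        simp [cvIsBracket, cvIsOpen, cvRun, cvAllowedChar, List.all_cons]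
    · by_cases hcl : c = ')' ∨ c = ']' ∨ c = '}' ∨ c = '>'
      · cases st with
        | nil =>
          rcases hcl with h | h | h | h <;> subst h <;>
            simp [cvLoopA, cvBracketPairs, cvIsBracket, cvIsOpen, cvRun, cvAllowedChar]
        | cons t rest =>
          rcases hcl with h | h | h | h <;> subst h <;>
            (by_cases ht : t = '(' ∨ t = '[' ∨ t = '{' ∨ t = '<') <;>
            first
            | (rcases ht with h' | h' | h' | h' <;> subst h' <;>
                simp [cvLoopA, cvBracketPairs, cvIsBracket, cvIsOpen, cvRun, cvPairB,
                  cvAllowedChar, List.all_cons, ih rest])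
            | (simp only [not_or] at ht
               obtain ⟨t1, t2, t3, t4⟩ := ht
               simp [cvLoopA, cvBracketPairs, cvIsBracket, cvIsOpen, cvRun, cvPairB,
                 cvAllowedChar, List.all_cons, t1, t2, t3, t4])
      · -- ordinary (non-bracket) character
        simp only [not_or] at hop hcl
        obtain ⟨ho1, ho2, ho3, ho4⟩ := hop
        obtain ⟨hc1, hc2, hc3, hc4⟩ := hcl
        have hbp : cvBracketPairs c = none := by simp [cvBracketPairs, hc1, hc2, hc3, hc4]
        have hbr : cvIsBracket c = false := by
          simp [cvIsBracket, ho1, ho2, ho3, ho4, hc1, hc2, hc3, hc4]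
        have hall : cvAllowedChar c =
            (PySem.Chars.isalnum c || [' ', '+', '-', '*', '/'].contains c) := by
          simp [cvAllowedChar, List.contains_eq_mem,
            ho1, ho2, ho3, ho4, hc1, hc2, hc3, hc4]
        by_cases hbad : ¬ PySem.Chars.isalnum c ∧ c ∉ [' ', '+', '-', '*', '/']
        · have hfalse : cvAllowedChar c = false := by
            rw [hall]; simp_all [List.contains_eq_mem]
          have h1 : cvLoopA (c :: cs) st = "invalid" := by
            simp only [cvLoopA]
            rw [if_neg (by simp [ho1, ho2, ho3, ho4]), hbp]
            exact if_pos hbad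
          rw [h1]
          simp [List.all_cons, hfalse]
        · have hok : cvAllowedChar c = true := by
            rw [hall]
            by_cases ha : PySem.Chars.isalnum c
            · simp [ha]
            · have : c ∈ [' ', '+', '-', '*', '/'] := by tauto
              simp [List.contains_eq_mem, this]
          have h1 : cvLoopA (c :: cs) st = cvLoopA cs st := by
            simp only [cvLoopA]
            rw [if_neg (by simp [ho1, ho2, ho3, ho4]), hbp]
            exact if_neg hbad
          rw [h1, ih st]
          simp [List.all_cons, hok, hbr]

-- ===== VERDICT =====
theorem check_validity_spec : Claim_equal_check_validity := by
  intro text _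
  unfold Spec_check_validity check_validity check_validity_alt
  rw [cvBridgeA text.toList []]
  have hm := cvMain (text.toList.filter cvIsBracket).length
    (text.toList.filter cvIsBracket) (le_refl _)
  by_cases h1 : text.toList.all cvAllowedChar
  · simp only [h1, if_true, true_and]
    by_cases h2 : cvRun (text.toList.filter cvIsBracket) [] = some []
    · rw [if_pos h2, if_pos (hm.mp h2)]
    · rw [if_neg h2, if_neg (fun hr => h2 (hm.mpr hr))]
  · rw [if_neg (fun h => h1 h.1), if_neg h1]
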